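-- pv_equiv track=rewrite | github.com/cllnhng/cs61a | hw04.py | remove_odd_indices
-- ===== SOURCE A (Python) =====
-- def remove_odd_indices(lst, odd):
--     """Remove elements of lst that have odd indices. Use recursion!
--
--     >>> s = [1, 2, 3, 4]
--     >>> t = remove_odd_indices(s, True)
--     >>> s
--     [1, 2, 3, 4]
--     >>> t
--     [1, 3]
--     >>> l = [5, 6, 7, 8]
--     >>> m = remove_odd_indices(l, False)
--     >>> m
--     [6, 8]
--     >>> remove_odd_indices([9, 8, 7, 6, 5, 4, 3], False)
--     [8, 6, 4]
--     >>> remove_odd_indices([2], False)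
--     []
--     >>> # Do not use while/for loops!
--     >>> from construct_check import check
--     >>> # ban iteration
--     >>> check(HW_SOURCE_FILE, 'remove_odd_indices',
--     ...       ['While', 'For'])
--     True
--     """
--     # 0 is even
--     # when True, remove odds (1,3,5)
--     # when False, remove evens (0,2,4)
--     result = []
--     if len(lst) <= 1 and odd == True:
--         return lst
--     if len(lst) <= 1 and odd == False:
--         return []
--
--     if odd == True:
--         result = [lst[0]] + remove_odd_indices(lst[2:], odd)
--         return result
--     if odd == False:
--         result = [lst[1]] + remove_odd_indices(lst[2:], odd)
--         return result
-- ===== SOURCE B (Python) =====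
-- def remove_odd_indices(lst, odd):
--     start = 0 if odd else 1
--     result = []
--     for i in range(start, len(lst), 2):
--         result.append(lst[i])
--     return result
-- ===== Notes on version B (the rewrite author's own statement) =====
-- stated objective: faster
-- what changed: Replaces the slice-based recursion (each step copies lst[2:], giving quadratic work and O(n) recursion depth) with a single iterative pass over range(start, len(lst), 2) appending each kept element; no base-case analysis needed.
import Mathlib
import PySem

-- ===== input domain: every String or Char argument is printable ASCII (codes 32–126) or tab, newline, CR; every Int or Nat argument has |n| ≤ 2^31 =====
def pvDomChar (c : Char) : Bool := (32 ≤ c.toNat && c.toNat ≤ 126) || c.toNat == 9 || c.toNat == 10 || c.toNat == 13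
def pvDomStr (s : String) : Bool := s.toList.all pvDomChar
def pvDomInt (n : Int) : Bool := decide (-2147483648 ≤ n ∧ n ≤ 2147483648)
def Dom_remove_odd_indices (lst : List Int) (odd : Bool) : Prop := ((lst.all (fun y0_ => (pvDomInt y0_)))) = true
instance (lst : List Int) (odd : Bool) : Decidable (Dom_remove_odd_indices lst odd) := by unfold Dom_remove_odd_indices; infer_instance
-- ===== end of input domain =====

-- B replaces A's slice-based recursion with one iterative pass over range(start, len, 2); same return value everywhere.

-- ===== PORT A =====
-- lst[2:] (used by A's recursion; also gives the termination measure)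
theorem pvSliceTwo (lst : List Int) : PySem.List.slice lst (some 2) none = lst.drop 2 := by
  exact_mod_cast PySem.List.slice_from_natCast lst 2

def remove_odd_indices (lst : List Int) (odd : Bool) : List Int :=
  if lst.length ≤ 1 ∧ odd = true then lst
  else if lst.length ≤ 1 ∧ odd = false then []
  else if odd = true then
    (PySem.List.pyGet? lst 0).getD 0 :: remove_odd_indices (PySem.List.slice lst (some 2) none) odd
  else
    (PySem.List.pyGet? lst 1).getD 0 :: remove_odd_indices (PySem.List.slice lst (some 2) none) odd
termination_by lst.length
decreasing_by
  all_goals simp_all [pvSliceTwo]; omega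

-- ===== PORT B =====
def remove_odd_indices_alt (lst : List Int) (odd : Bool) : List Int :=
  let start : Int := if odd then 0 else 1
  (PySem.List.pyRange start (lst.length : Int) 2).foldl
    (fun result i => result ++ [(PySem.List.pyGet? lst i).getD 0]) []

-- ===== PRECONDITION & SPEC =====
def Spec_remove_odd_indices (lst : List Int) (odd : Bool) (out : List Int) : Prop := out = remove_odd_indices_alt lst odd
instance (lst : List Int) (odd : Bool) (out : List Int) : Decidable (Spec_remove_odd_indices lst odd out) := by unfold Spec_remove_odd_indices; infer_instance

-- ===== CLAIM (what is proved, stated in full; the proofs are below) =====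
def Claim_equal_remove_odd_indices : Prop := ∀ (lst : List Int) (odd : Bool), Dom_remove_odd_indices lst odd → Spec_remove_odd_indices lst odd (remove_odd_indices lst odd)

-- ===== LEMMAS AND PROOFS =====

theorem pvAlt_map (lst : List Int) (odd : Bool) :
    remove_odd_indices_alt lst odd =
      (PySem.List.pyRange (if odd then 0 else 1) (lst.length : Int) 2).map
        (fun i => (PySem.List.pyGet? lst i).getD 0) := by
  simp only [remove_odd_indices_alt]
  rw [PySem.List.foldl_append_singleton_eq_map (fun i => (PySem.List.pyGet? lst i).getD 0)]
  simp

theorem pvAlt_nil (odd : Bool) : remove_odd_indices_alt [] odd = [] := by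
  cases odd <;> decide

theorem pvAlt_one (x : Int) : remove_odd_indices_alt [x] true = [x] ∧ remove_odd_indices_alt [x] false = [] := by
  constructor <;>
    · rw [pvAlt_map]
      norm_num [PySem.List.pyRange_of_pos _ _ (by norm_num : (0:Int) < 2)]

theorem pvRange_two_cons (s b : Int) (hlt : s < b) :
    PySem.List.pyRange s b 2 = s :: PySem.List.pyRange (s + 2) b 2 := by
  rw [PySem.List.pyRange_of_pos _ _ (by norm_num), PySem.List.pyRange_of_pos _ _ (by norm_num)]
  rw [if_pos hlt]
  by_cases hb : s + 2 < b
  · rw [if_pos hb]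
    have : ((b - s + 2 - 1) / 2).toNat = ((b - (s + 2) + 2 - 1) / 2).toNat + 1 := by omega
    rw [this, List.range_succ_eq_map, List.map_cons, List.map_map]
    congr 1
    · simp
    · apply List.map_congr_left; intro k _; simp; ring
  · rw [if_neg hb]
    have : ((b - s + 2 - 1) / 2).toNat = 1 := by omega
    rw [this]
    simp

theorem pvAlt_cons2 (x y : Int) (t : List Int) (odd : Bool) :
    remove_odd_indices_alt (x :: y :: t) odd =
      (if odd then x else y) :: remove_odd_indices_alt t odd := by
  rw [pvAlt_map, pvAlt_map]
  have hlen : ((x :: y :: t).length : Int) = (t.length : Int) + 2 := by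
    simp; omega
  rw [hlen]
  have hshift : PySem.List.pyRange ((if odd then 0 else 1) + 2) ((t.length : Int) + 2) 2
      = (PySem.List.pyRange (if odd then 0 else 1) (t.length : Int) 2).map (· + 2) := by
    rw [PySem.List.pyRange_of_pos _ _ (by norm_num), PySem.List.pyRange_of_pos _ _ (by norm_num)]
    have hc : (if (if odd then (0:Int) else 1) + 2 < (t.length : Int) + 2 then
          (((t.length : Int) + 2 - ((if odd then (0:Int) else 1) + 2) + 2 - 1) / 2).toNat else 0)
        = (if (if odd then (0:Int) else 1) < (t.length : Int) then
          (((t.length : Int) - (if odd then (0:Int) else 1) + 2 - 1) / 2).toNat else 0) := by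
      cases odd <;> simp <;> split_ifs <;> omega
    rw [hc, List.map_map]
    apply List.map_congr_left
    intro k _; simp; ring
  rw [pvRange_two_cons (if odd then 0 else 1) ((t.length : Int) + 2)
        (by cases odd <;> simp <;> omega),
      hshift, List.map_cons, List.map_map]
  congr 1
  · cases odd <;> norm_num
  · apply List.map_congr_left
    intro i hi
    have h0i : 0 ≤ i := by
      rcases (PySem.List.mem_pyRange_iff_of_pos (by norm_num) i).mp hi with ⟨h1, _, _⟩
      cases odd <;> simp_all <;> omega
    simp only [Function.comp]
    rw [PySem.List.pyGet?_of_nonneg _ (by omega : (0:Int) ≤ i + 2), PySem.List.pyGet?_of_nonneg _ h0i]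
    have : (i + 2).toNat = i.toNat + 2 := by omega
    rw [this]
    simp

theorem pvMain : ∀ (n : Nat) (lst : List Int) (odd : Bool), lst.length ≤ n →
    remove_odd_indices lst odd = remove_odd_indices_alt lst odd := by
  intro n
  induction n with
  | zero =>
    intro lst odd h
    have : lst = [] := by cases lst <;> simp_all
    subst this; rw [pvAlt_nil, remove_odd_indices]; cases odd <;> simp
  | succ n ih =>
    intro lst odd h
    match lst with
    | [] => rw [pvAlt_nil, remove_odd_indices]; cases odd <;> simp
    | [x] =>
      cases odd
      · rw [(pvAlt_one x).2, remove_odd_indices]; simp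
      · rw [(pvAlt_one x).1, remove_odd_indices]; simp
    | x :: y :: t =>
      rw [pvAlt_cons2]
      rw [remove_odd_indices]
      have hlen : ¬ ((x :: y :: t).length ≤ 1) := by simp
      rw [if_neg (by simp), if_neg (by simp), pvSliceTwo]
      have ht : t.length ≤ n := by simp at h; omega
      cases odd
      · rw [if_neg (by simp)]
        simp only [List.drop_succ_cons, List.drop_zero, if_neg (Bool.false_ne_true)]
        rw [ih t false ht, PySem.List.pyGet?_of_nonneg _ (by norm_num : (0:Int) ≤ 1)]
        simp
      · rw [if_pos rfl]
        simp only [List.drop_succ_cons, List.drop_zero]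
        rw [ih t true ht, PySem.List.pyGet?_zero_cons]
        simp

-- ===== VERDICT (by name: the statement is the Claim_ definition above) =====
theorem remove_odd_indices_spec : Claim_equal_remove_odd_indices := by
  intro lst odd _
  unfold Spec_remove_odd_indices
  exact pvMain lst.length lst odd le_rfl
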